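-- pv_equiv track=rewrite | github.com/donut0310/Problem-Solving-Python- | Programmers/Review/2022 카카오 블라인드/신고 결과 받기.py | solution
-- ===== SOURCE A (Python) =====
-- from collections import defaultdict
--
-- def solution(id_list, report, k):
--     answer = []
--     user_info = defaultdict(int)
--     target_info = defaultdict(list)
--     duplicate = set()
--     for record in report:
--         if record in duplicate: continue
--         duplicate.add(record)
--         user, target_user = record.split(' ')
--         target_info[target_user].append(user)
--
--     for target in target_info:
--         p = target_info[target]
--         if len(p) >= k:
--             for i in p:
--                 user_info[i]+=1
--
--     for user in id_list:
--         answer.append(user_info[user])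
--     return answer
-- ===== SOURCE B (Python) =====
-- def solution(id_list, report, k):
--     # Brute force without any count tables or grouping: dedup once, then answer
--     # each id directly by a nested count over the deduped (user, target) pairs.
--     pairs = [r.split(' ') for r in dict.fromkeys(report)]
--     return [sum(1 for u, t in pairs
--                 if u == uid and sum(1 for _, t2 in pairs if t2 == t) >= k)
--             for uid in id_list]
-- ===== Notes on version B (the rewrite author's own statement) =====
-- stated objective: simpler
-- what changed: Drops all of A's tables (per-target reporter lists, the seen-set loop, the per-user counter dict): B dedups the log once and answers each id directly with a nested count over the deduped (user, target) pairs, re-counting a target's distinct reporters on the fly; shorter and plainer at the price of quadratic cost.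
import Mathlib
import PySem

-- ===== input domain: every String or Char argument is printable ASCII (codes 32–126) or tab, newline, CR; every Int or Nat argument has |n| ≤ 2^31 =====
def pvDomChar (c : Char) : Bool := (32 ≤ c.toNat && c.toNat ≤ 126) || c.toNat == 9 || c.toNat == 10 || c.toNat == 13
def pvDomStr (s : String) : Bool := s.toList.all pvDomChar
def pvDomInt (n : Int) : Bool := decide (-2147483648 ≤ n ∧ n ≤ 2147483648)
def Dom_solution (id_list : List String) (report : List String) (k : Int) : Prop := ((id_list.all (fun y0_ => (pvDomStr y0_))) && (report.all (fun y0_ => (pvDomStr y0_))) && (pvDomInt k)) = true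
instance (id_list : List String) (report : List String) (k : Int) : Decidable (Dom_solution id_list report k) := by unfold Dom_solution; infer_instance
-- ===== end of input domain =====

-- B drops all of A's tables (per-target reporter lists, seen-set, per-user counter dict):
-- it dedups the log once and answers each id by a direct nested count over the deduped
-- (user, target) pairs — plainer and shorter, at the price of quadratic cost.

-- ===== PORT A =====
-- first loop of A: dedup via the 'duplicate' set, group reporters per target
def solution (id_list : List String) (report : List String) (k : Int) : List Int :=
  let st := report.foldl
    (fun (st : PySem.Set String × PySem.Dict String (List String)) record =>
      if PySem.Set.contains st.1 record then st
      else
        (PySem.Set.add st.1 record,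
         match PySem.Str.split? record " " with
         | some [user, target_user] => st.2.modify target_user [] (fun l => l ++ [user])
         | _ => st.2))   -- Python raises ValueError here (≠ 2 fields); excluded by Pre_
    ([], PySem.Dict.empty)
  let user_info := st.2.items.foldl
    (fun (ui : PySem.Dict String Int) tp =>
      if k ≤ (tp.2.length : Int) then tp.2.foldl (fun ui i => ui.modify i 0 (fun n => n + 1)) ui else ui)
    PySem.Dict.empty
  id_list.foldl (fun answer user => answer ++ [user_info.getD user 0]) []

-- ===== PORT B =====
-- B-side helper: the split of one record into its (user, target) pair
def pvSplit2 (r : String) : String × String :=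
  let l := (PySem.Str.split? r " ").getD []
  if l.length = 2 then (l.headD "", l.tail.headD "")
  else ("", "")   -- Python's 'u, t = …' unpack raises ValueError here (≠ 2 fields); excluded by Pre_

def solution_alt (id_list : List String) (report : List String) (k : Int) : List Int :=
  let pairs := (PySem.List.dedup report).map pvSplit2
  id_list.map (fun uid =>
    ((pairs.countP (fun p =>
        p.1 == uid && decide (k ≤ ((pairs.countP (fun q => q.2 == p.2) : Nat) : Int)))) : Int))

-- ===== PRECONDITION & SPEC =====
-- Pre_ excludes exactly the reports that do not split on ' ' into two fields: there
-- the Python A (and B) raises ValueError when unpacking record.split(' ').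
def Pre_solution (_id_list : List String) (report : List String) (_k : Int) : Prop :=
  ∀ r ∈ report, ((PySem.Str.split? r " ").getD []).length = 2
instance (id_list : List String) (report : List String) (k : Int) : Decidable (Pre_solution id_list report k) := by unfold Pre_solution; infer_instance

def pvWitness_solution : List String × List String × Int := (["muzi", "frodo"], ["muzi frodo", "frodo muzi", "muzi frodo"], 1)

def Spec_solution (id_list : List String) (report : List String) (k : Int) (out : List Int) : Prop := out = solution_alt id_list report k
instance (id_list : List String) (report : List String) (k : Int) (out : List Int) : Decidable (Spec_solution id_list report k out) := by unfold Spec_solution; infer_instance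

-- ===== CLAIM (what is proved, stated in full; the proofs are below) =====
def Claim_equal_solution : Prop := ∀ (id_list : List String) (report : List String) (k : Int), Dom_solution id_list report k → Pre_solution id_list report k → Spec_solution id_list report k (solution id_list report k)

-- ===== LEMMAS AND PROOFS =====

-- the (user, target) pair of a record (meaningful under Pre_)
def pvPair (r : String) : String × String :=
  match (PySem.Str.split? r " ").getD [] with
  | u :: t :: _ => (u, t)
  | _ => ("", "")

-- the records A's first loop actually processes, given the already-seen set s
def pvDedupFrom (s : PySem.Set String) : List String → List String
  | [] => []
  | r :: rest =>
    if PySem.Set.contains s r then pvDedupFrom s rest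
    else r :: pvDedupFrom (PySem.Set.add s r) rest

lemma pvFoldlSkip {σ : Type} (f : σ → String → σ) (report : List String)
    (s : PySem.Set String) (d : σ) :
    (report.foldl
      (fun st r => if PySem.Set.contains st.1 r then st else (PySem.Set.add st.1 r, f st.2 r))
      (s, d)).2
    = (pvDedupFrom s report).foldl f d := by
  induction report generalizing s d with
  | nil => rfl
  | cons r rest ih =>
    simp only [List.foldl_cons, pvDedupFrom]
    by_cases h : PySem.Set.contains s r = true
    · rw [if_pos h, if_pos h]
      exact ih s d
    · rw [if_neg h, if_neg h]
      exact ih (PySem.Set.add s r) (f d r)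

lemma pvUpdate_eq_append (l : List String) (s : PySem.Set String) :
    PySem.Set.update s l = s ++ pvDedupFrom s l := by
  induction l generalizing s with
  | nil => simp [PySem.Set.update, pvDedupFrom]
  | cons r rest ih =>
    have hstep : PySem.Set.update s (r :: rest) = PySem.Set.update (PySem.Set.add s r) rest := by
      simp [PySem.Set.update]
    by_cases h : PySem.Set.contains s r = true
    · have hm : r ∈ s := by simpa [PySem.Set.contains, List.contains_iff_mem] using h
      have hadd : PySem.Set.add s r = s := by simp [PySem.Set.add, hm]
      rw [hstep, hadd, ih s, pvDedupFrom, if_pos h]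
    · have hm : r ∉ s := by simpa [PySem.Set.contains, List.contains_iff_mem] using h
      have hadd : PySem.Set.add s r = s ++ [r] := by simp [PySem.Set.add, hm]
      rw [hstep, ih (PySem.Set.add s r), pvDedupFrom, if_neg h, hadd]
      simp

lemma pvDedup_eq_dedupFrom (l : List String) :
    PySem.List.dedup l = pvDedupFrom [] l := by
  rw [PySem.List.dedup_eq_ofList, ← PySem.Set.update_nil_left]
  simpa using pvUpdate_eq_append l []

lemma pvGetD_A_loop (its : List (String × List String)) (k : Int)
    (d : PySem.Dict String Int) (u : String) :
    (its.foldl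
      (fun ui tp => if k ≤ (tp.2.length : Int) then tp.2.foldl (fun ui i => ui.modify i 0 (fun n => n + 1)) ui else ui)
      d).getD u 0
    = d.getD u 0 + (its.map (fun tp => if k ≤ (tp.2.length : Int) then ((tp.2.count u : Nat) : Int) else 0)).sum := by
  induction its generalizing d with
  | nil => simp
  | cons tp rest ih =>
    simp only [List.foldl_cons, List.map_cons, List.sum_cons]
    by_cases h : k ≤ (tp.2.length : Int)
    · rw [if_pos h, if_pos h, ih, PySem.Dict.getD_foldl_modify_add_one]
      ring
    · rw [if_neg h, if_neg h, ih]
      ring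

lemma pvSum_ite_single (T : List String) (a : String) (c : Nat)
    (hnd : T.Nodup) (ha : a ∈ T) :
    (T.map (fun t => if a = t then c else 0)).sum = c := by
  induction T with
  | nil => cases ha
  | cons b T ih =>
    rcases List.mem_cons.mp ha with h | h
    · subst h
      have hnin : a ∉ T := (List.nodup_cons.mp hnd).1
      have hz : (T.map (fun t => if a = t then c else 0)).sum = 0 := by
        apply List.sum_eq_zero
        intro x hx
        rcases List.mem_map.mp hx with ⟨t, ht, rfl⟩
        have : a ≠ t := fun h' => hnin (h' ▸ ht)
        simp [this]
      simp [hz]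
    · have hne : a ≠ b := by
        rintro rfl
        exact (List.nodup_cons.mp hnd).1 h
      simp only [List.map_cons, List.sum_cons, if_neg hne]
      rw [ih (List.nodup_cons.mp hnd).2 h]
      omega

lemma pvSum_countP_partition (l : List (String × String)) (r : String × String → Bool)
    (T : List String) (hnd : T.Nodup) (hmem : ∀ q ∈ l, q.1 ∈ T) :
    (T.map (fun t => l.countP (fun q => r q && (q.1 == t)))).sum = l.countP r := by
  induction l with
  | nil => simp
  | cons q rest ih =>
    have hrest : ∀ q' ∈ rest, q'.1 ∈ T := fun q' h => hmem q' (List.mem_cons_of_mem _ h)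
    have hq : q.1 ∈ T := hmem q List.mem_cons_self
    simp only [List.countP_cons]
    have hsplit : (T.map (fun t => rest.countP (fun q' => r q' && (q'.1 == t)) + if (r q && (q.1 == t)) = true then 1 else 0)).sum
        = (T.map (fun t => rest.countP (fun q' => r q' && (q'.1 == t)))).sum
          + (T.map (fun t => if (r q && (q.1 == t)) = true then 1 else 0)).sum := by
      exact List.sum_map_add
    rw [hsplit, ih hrest]
    congr 1
    by_cases hr : r q = true
    · simpa [hr, beq_iff_eq] using pvSum_ite_single T q.1 1 hnd hq
    · simp [hr]

lemma pvKeyCount (grp : List (String × String)) (pp : String → Bool)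
    (T : List String) (hnd : T.Nodup) (hmem : ∀ q ∈ grp, q.1 ∈ T) (u : String) :
    (T.map (fun t => if pp t then ((grp.filter (fun q => q.1 == t)).map (fun q => q.2)).count u else 0)).sum
    = ((grp.filter (fun q => pp q.1)).map (fun q => q.2)).count u := by
  have hterm : ∀ t, (if pp t then ((grp.filter (fun q => q.1 == t)).map (fun q => q.2)).count u else 0)
      = grp.countP (fun q => ((q.2 == u) && pp q.1) && (q.1 == t)) := by
    intro t
    by_cases hp : pp t = true
    · rw [if_pos hp]
      rw [List.count_eq_countP, List.countP_map, List.countP_filter]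
      apply List.countP_congr
      intro q hq
      by_cases hqt : q.1 = t
      · subst hqt
        simp [Function.comp, hp]
      · have : (q.1 == t) = false := by simp [hqt]
        simp [Function.comp, this]
    · rw [if_neg hp]
      symm
      rw [List.countP_eq_zero]
      intro q hq hcontra
      simp only [Bool.and_eq_true, beq_iff_eq] at hcontra
      rcases hcontra with ⟨⟨_, hppq⟩, hqt⟩
      rw [hqt] at hppq
      simp [hppq] at hp
  calc (T.map (fun t => if pp t then ((grp.filter (fun q => q.1 == t)).map (fun q => q.2)).count u else 0)).sum
      = (T.map (fun t => grp.countP (fun q => ((q.2 == u) && pp q.1) && (q.1 == t)))).sum := by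
        exact congrArg List.sum (List.map_congr_left (fun t _ => hterm t))
    _ = grp.countP (fun q => (q.2 == u) && pp q.1) := pvSum_countP_partition grp _ T hnd hmem
    _ = ((grp.filter (fun q => pp q.1)).map (fun q => q.2)).count u := by
        rw [List.count_eq_countP, List.countP_map, List.countP_filter]
        rfl

lemma pvKeyCountInt (grp : List (String × String)) (pp : String → Bool)
    (T : List String) (hnd : T.Nodup) (hmem : ∀ q ∈ grp, q.1 ∈ T) (u : String) :
    (T.map (fun t => if pp t then ((((grp.filter (fun q => q.1 == t)).map (fun q => q.2)).count u : Nat) : Int) else 0)).sum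
    = (((grp.filter (fun q => pp q.1)).map (fun q => q.2)).count u : Int) := by
  rw [← pvKeyCount grp pp T hnd hmem u, Nat.cast_list_sum, List.map_map]
  congr 1
  apply List.map_congr_left
  intro t _
  by_cases h : pp t <;> simp [h]

lemma pvSplit_of_pre (r : String) (h : ((PySem.Str.split? r " ").getD []).length = 2) :
    PySem.Str.split? r " " = some [(pvPair r).1, (pvPair r).2] := by
  cases hs : PySem.Str.split? r " " with
  | none => rw [hs] at h; simp at h
  | some l =>
    rw [hs] at h
    simp only [Option.getD_some] at h
    match l, h with
    | [a, b], _ => simp [pvPair, hs]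

lemma pvSplit2_eq_pvPair (r : String) (h : ((PySem.Str.split? r " ").getD []).length = 2) :
    pvSplit2 r = pvPair r := by
  unfold pvSplit2 pvPair
  rcases hx : (PySem.Str.split? r " ").getD [] with _ | ⟨a, _ | ⟨b, _ | ⟨c, tl⟩⟩⟩ <;>
    simp_all

-- ===== VERDICT (by name: the statement is the Claim_ definition above) =====
theorem solution_spec : Claim_equal_solution := by
  intro id_list report k _ hpre
  unfold Spec_solution solution solution_alt
  dsimp only
  have hpre' : ∀ r ∈ PySem.List.dedup report, ((PySem.Str.split? r " ").getD []).length = 2 :=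
    fun r hr => hpre r ((PySem.List.mem_dedup report r).mp hr)
  have hsplit : ∀ r ∈ PySem.List.dedup report,
      PySem.Str.split? r " " = some [(pvPair r).1, (pvPair r).2] :=
    fun r hr => pvSplit_of_pre r (hpre' r hr)
  -- A's first loop: skip-the-seen fold = plain fold over the deduped records
  rw [pvFoldlSkip (fun d r =>
        match PySem.Str.split? r " " with
        | some [user, target_user] => d.modify target_user [] (fun l => l ++ [user])
        | _ => d) report [] PySem.Dict.empty,
      ← pvDedup_eq_dedupFrom]
  rw [PySem.List.foldl_congr_mem (PySem.List.dedup report)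
        (fun d r =>
          match PySem.Str.split? r " " with
          | some [user, target_user] => d.modify target_user [] (fun l => l ++ [user])
          | _ => d)
        (fun d r => d.modify (pvPair r).2 [] (fun l => l ++ [(pvPair r).1]))
        PySem.Dict.empty
        (by intro acc r hr; dsimp only; rw [hsplit r hr])]
  -- B's pair list over the deduped records
  have hpairs : (PySem.List.dedup report).map pvSplit2 = (PySem.List.dedup report).map pvPair :=
    List.map_congr_left (fun r hr => pvSplit2_eq_pvPair r (hpre' r hr))
  rw [hpairs]
  -- A's answer loop is a map
  rw [PySem.List.foldl_append_singleton_eq_map]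
  simp only [List.nil_append]
  apply List.map_congr_left
  intro u _
  have hgrpfold : (PySem.List.dedup report).foldl
      (fun d r => d.modify (pvPair r).2 [] fun l => l ++ [(pvPair r).1]) PySem.Dict.empty
      = ((PySem.List.dedup report).map (fun r => ((pvPair r).2, (pvPair r).1))).foldl
          (fun d q => d.modify q.1 [] fun l => l ++ [q.2]) PySem.Dict.empty := by
    rw [List.foldl_map]
  rw [hgrpfold]
  generalize hdd : PySem.List.dedup report = dd
  set grp := dd.map (fun r => ((pvPair r).2, (pvPair r).1)) with hgrp
  set tinfo := grp.foldl (fun d q => d.modify q.1 [] fun l => l ++ [q.2]) PySem.Dict.empty with htinfo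
  -- the per-target structure of A's dict
  have hndk : tinfo.keys.Nodup := by
    exact PySem.Dict.nodup_keys_foldl_modify_key grp (fun q => q.1) [] (fun _ q => fun l => l ++ [q.2])
      PySem.Dict.empty PySem.Dict.nodup_keys_empty
  have hkeys : tinfo.keys = PySem.List.dedup (grp.map (fun q => q.1)) := by
    have h := PySem.Dict.keys_foldl_modify_key grp (fun q => q.1) [] (fun _ q => fun l => l ++ [q.2])
      PySem.Dict.empty
    simpa [PySem.Dict.keys_empty, PySem.Set.update_nil_left, PySem.List.dedup_eq_ofList] using h
  have husers : ∀ t, tinfo.getD t [] = (grp.filter (fun q => q.1 == t)).map (fun q => q.2) := by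
    intro t
    have h := PySem.Dict.getD_foldl_modify_append grp (PySem.Dict.empty : PySem.Dict String (List String)) t
    simpa [PySem.Dict.getD_empty] using h
  rw [PySem.Dict.items_eq_map_keys tinfo hndk [], pvGetD_A_loop, PySem.Dict.getD_empty,
    List.map_map]
  simp only [zero_add, Function.comp_def]
  rw [hkeys]
  have hmemT : ∀ q ∈ grp, q.1 ∈ PySem.List.dedup (grp.map (fun q => q.1)) := by
    intro q hq
    exact (PySem.List.mem_dedup _ _).mpr (List.mem_map_of_mem hq)
  have hkc := pvKeyCountInt grp (fun t => decide (k ≤ ((grp.filter (fun q' => q'.1 == t)).length : Int)))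
    (PySem.List.dedup (grp.map (fun q => q.1))) (PySem.List.nodup_dedup _) hmemT u
  have hAterms : (PySem.List.dedup (grp.map (fun q => q.1))).map
        (fun t => if k ≤ ((tinfo.getD t []).length : Int) then ((List.count u (tinfo.getD t []) : Nat) : Int) else 0)
      = (PySem.List.dedup (grp.map (fun q => q.1))).map
        (fun t => if decide (k ≤ ((grp.filter (fun q' => q'.1 == t)).length : Int)) then
            ((((grp.filter (fun q' => q'.1 == t)).map (fun q' => q'.2)).count u : Nat) : Int) else 0) := by
    apply List.map_congr_left
    intro t _
    rw [husers t, List.length_map]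
    by_cases h : k ≤ ((grp.filter (fun q' => q'.1 == t)).length : Int)
    · simp [h]
    · simp [h]
  rw [hAterms, hkc]
  -- both sides are counts over the same deduped records; compare the Nat counts
  congr 1
  rw [List.count_eq_countP, List.countP_map, List.countP_filter]
  rw [List.countP_map, hgrp, List.countP_map]
  apply List.countP_congr
  intro r _
  simp only [Function.comp_def]
  have hlen : (List.filter (fun q' => q'.1 == (pvPair r).2) grp).length
      = List.countP (fun q => q.2 == (pvPair r).2) (List.map pvPair dd) := by
    rw [List.countP_eq_length_filter, hgrp, List.filter_map, List.length_map,
      List.filter_map, List.length_map]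
    simp [Function.comp_def]
  rw [hgrp] at hlen
  rw [hlen, Bool.and_comm]
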